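-- pv_equiv track=rewrite | github.com/learn-ukrainian/learn-ukrainian.github.io | scripts/lint_ipa.py | find_brackets
-- ===== SOURCE A (Python) =====
-- def find_brackets(line: str):
--     """Yield (start, end, content, after_char) for each [...] in line."""
--     i = 0
--     while i < len(line):
--         if line[i] == '[':
--             depth = 1
--             j = i + 1
--             while j < len(line) and depth > 0:
--                 if line[j] == '[':
--                     depth += 1
--                 elif line[j] == ']':
--                     depth -= 1
--                 j += 1
--             if depth == 0:
--                 content = line[i+1:j-1]
--                 after = line[j:j+1] if j < len(line) else ''
--                 yield i, j - 1, content, after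
--                 i = j
--             else:
--                 i += 1
--         else:
--             i += 1
-- ===== SOURCE B (Python) =====
-- def find_brackets(line: str):
--     """Yield (start, end, content, after_char) for each [...] in line.
--
--     One pass with a stack matches every ']' to its nearest unmatched '[';
--     the outermost (non-enclosed) matched pairs are then selected back-to-front.
--     """
--     stack = []
--     pairs = []
--     for j, ch in enumerate(line):
--         if ch == '[':
--             stack.append(j)
--         elif ch == ']' and stack:
--             pairs.append((stack.pop(), j))
--     out = []
--     minp = len(line)
--     for p, q in reversed(pairs):
--         if p < minp:
--             out.append((p, q, line[p + 1:q], line[q + 1:q + 2]))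
--             minp = p
--     yield from reversed(out)
-- ===== Notes on version B (the rewrite author's own statement) =====
-- stated objective: faster
-- what changed: A rescans from each '[' with a depth counter (re-reading the rest of the line after every unmatched '['); B makes one stack pass that matches every ']' to its nearest open '[', then selects the outermost (non-enclosed) pairs back-to-front, turning the O(n^2) worst case into O(n).
import Mathlib
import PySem

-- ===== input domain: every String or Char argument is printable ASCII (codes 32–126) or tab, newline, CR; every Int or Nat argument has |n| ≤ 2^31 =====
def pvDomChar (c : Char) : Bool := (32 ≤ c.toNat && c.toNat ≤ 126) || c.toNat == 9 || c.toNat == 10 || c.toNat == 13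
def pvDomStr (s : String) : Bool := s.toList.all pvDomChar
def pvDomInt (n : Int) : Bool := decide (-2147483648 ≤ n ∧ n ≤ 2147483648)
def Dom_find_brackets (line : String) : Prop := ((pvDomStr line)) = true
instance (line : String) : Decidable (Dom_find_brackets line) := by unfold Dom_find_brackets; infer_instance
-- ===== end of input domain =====

-- B replaces A's rescanning outer loop by one stack pass collecting matched pairs plus a
-- back-to-front selection of the outermost ones (objective: faster on bracket-heavy lines).

-- Python's line[a:b] for Nat bounds (exact: PySem.List.slice is Python slicing)
def sl (cs : List Char) (a b : Nat) : String :=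
  String.mk (PySem.List.slice cs (some (a : Int)) (some (b : Int)))

-- ===== PORT A =====
-- inner while loop of A: from index j with current depth d, returns (final j, final depth)
def scanA (cs : List Char) (j d : Nat) : Nat × Nat :=
  if h : j < cs.length ∧ 0 < d then
    scanA cs (j + 1)
      (if cs.getD j ' ' = '[' then d + 1 else if cs.getD j ' ' = ']' then d - 1 else d)
  else (j, d)
termination_by cs.length - j

-- needed by goA's termination proof (cited in decreasing_by)
theorem scanA_le (cs : List Char) (j d : Nat) : j ≤ (scanA cs j d).1 := by
  fun_induction scanA cs j d with
  | case1 j d h ih => simp only [dite_eq_ite] at ih; omega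
  | case2 j d h => simp

-- outer while loop of A
def goA (cs : List Char) (i : Nat) : List (Int × Int × String × String) :=
  if h : i < cs.length then
    if cs.getD i ' ' = '[' then
      let r := scanA cs (i + 1) 1
      if r.2 = 0 then
        ((i : Int), ((r.1 - 1 : Nat) : Int), sl cs (i + 1) (r.1 - 1),
          if r.1 < cs.length then sl cs r.1 (r.1 + 1) else "") :: goA cs r.1
      else goA cs (i + 1)
    else goA cs (i + 1)
  else []
termination_by cs.length - i
decreasing_by
  · have := scanA_le cs (i + 1) 1; omega
  · omega
  · omega

def find_brackets (line : String) : List (Int × Int × String × String) :=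
  goA line.toList 0

-- ===== PORT B =====
-- one step of B's enumerate loop: push '[' indices, pop on ']' recording the matched pair
def stepB (st : List Nat × List (Nat × Nat)) (x : Nat × Char) : List Nat × List (Nat × Nat) :=
  if x.2 = '[' then (x.1 :: st.1, st.2)
  else if x.2 = ']' then
    match st.1 with
    | [] => st
    | p :: rest => (rest, st.2 ++ [(p, x.1)])
  else st

-- enumerate(line) with Nat indices
def enumN : Nat → List Char → List (Nat × Char)
  | _, [] => []
  | k, c :: cs => (k, c) :: enumN (k + 1) cs

def mkOut (cs : List Char) (p q : Nat) : Int × Int × String × String :=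
  ((p : Int), (q : Int), sl cs (p + 1) q, sl cs (q + 1) (q + 2))

-- one step of B's reversed-pairs loop: keep a pair iff it starts left of every kept pair
def filtStep (cs : List Char) (st : Nat × List (Int × Int × String × String)) (pr : Nat × Nat) :
    Nat × List (Int × Int × String × String) :=
  if pr.1 < st.1 then (pr.1, st.2 ++ [mkOut cs pr.1 pr.2]) else st

def find_brackets_alt (line : String) : List (Int × Int × String × String) :=
  let cs := line.toList
  let pairs := (List.foldl stepB ([], []) (enumN 0 cs)).2
  (List.foldl (filtStep cs) (cs.length, []) pairs.reverse).2.reverse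

-- ===== PRECONDITION & SPEC =====
def Spec_find_brackets (line : String) (out : List (Int × Int × String × String)) : Prop := out = find_brackets_alt line
instance (line : String) (out : List (Int × Int × String × String)) : Decidable (Spec_find_brackets line out) := by unfold Spec_find_brackets; infer_instance

-- ===== CLAIM (what is proved, stated in full; the proofs are below) =====
def Claim_equal_find_brackets : Prop := ∀ (line : String), Dom_find_brackets line → Spec_find_brackets line (find_brackets line)

-- ===== LEMMAS AND PROOFS =====

-- list-structural version of A's inner scan: (#chars consumed, final depth)
def scanL : List Char → Nat → Nat × Nat
  | [], d => (0, d)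
  | c :: l, d =>
    if d = 0 then (0, d)
    else
      ((scanL l (if c = '[' then d + 1 else if c = ']' then d - 1 else d)).1 + 1,
       (scanL l (if c = '[' then d + 1 else if c = ']' then d - 1 else d)).2)

def runB (l : List (Nat × Char)) (t : List Nat) (ps : List (Nat × Nat)) :
    List Nat × List (Nat × Nat) :=
  List.foldl stepB (t, ps) l

-- B's reversed filter, output already in forward order
def filtR (cs : List Char) : List (Nat × Nat) → Nat → List (Int × Int × String × String)
  | [], _ => []
  | pr :: rest, m =>
    if pr.1 < m then filtR cs rest pr.1 ++ [mkOut cs pr.1 pr.2] else filtR cs rest m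

def minpA : List (Nat × Nat) → Nat → Nat
  | [], m => m
  | pr :: rest, m => minpA rest (if pr.1 < m then pr.1 else m)

theorem runB_cons (x : Nat × Char) (l : List (Nat × Char)) (t : List Nat)
    (ps : List (Nat × Nat)) :
    runB (x :: l) t ps = runB l (stepB (t, ps) x).1 (stepB (t, ps) x).2 := rfl

theorem scanL_zero (l : List Char) : scanL l 0 = (0, 0) := by
  cases l <;> simp [scanL]

theorem scanA_eq_scanL (cs : List Char) (j d : Nat) :
    scanA cs j d = (j + (scanL (cs.drop j) d).1, (scanL (cs.drop j) d).2) := by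
  fun_induction scanA cs j d with
  | case1 j d h ih =>
    simp only [dite_eq_ite] at ih
    obtain ⟨hj, hd⟩ := h
    have hd0 : ¬ d = 0 := by omega
    rw [List.drop_eq_getElem_cons hj, scanL, if_neg hd0]
    simp only [List.getD_eq_getElem?_getD, List.getElem?_eq_getElem hj, Option.getD_some] at ih ⊢
    rw [ih]
    simp [Prod.ext_iff]
    omega
  | case2 j d h =>
    rcases Nat.lt_or_ge j cs.length with hj | hj
    · have hd : d = 0 := by omega
      subst hd
      rw [scanL_zero]
      simp
    · rw [List.drop_eq_nil_of_le hj, scanL]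
      simp

theorem runB_acc (l : List (Nat × Char)) (t : List Nat) (ps : List (Nat × Nat)) :
    runB l t ps = ((runB l t []).1, ps ++ (runB l t []).2) := by
  induction l generalizing t ps with
  | nil => simp [runB]
  | cons x rest ih =>
    have hstep : ∀ ps' : List (Nat × Nat), stepB (t, ps') x
        = ((stepB (t, []) x).1, ps' ++ (stepB (t, []) x).2) := by
      intro ps'
      unfold stepB
      by_cases h1 : x.2 = '['
      · simp [h1]
      · by_cases h2 : x.2 = ']'
        · simp only [h2, if_true]
          cases t <;> simp
        · simp [h1, h2]
    simp only [runB, List.foldl_cons] at *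
    rw [hstep ps, hstep []]
    simp only [List.nil_append]
    rw [ih, ih ((stepB (t, []) x).1) ((stepB (t, []) x).2)]
    simp

-- while the scan depth stays positive, the fold never pops below the top |u| = d-1 stack entries
theorem runB_nopop (l : List Char) :
    ∀ (k d : Nat) (u t : List Nat) (ps : List (Nat × Nat)),
      u.length + 1 = d → 0 < (scanL l d).2 →
      runB (enumN k l) (u ++ t) ps
        = ((runB (enumN k l) u ps).1 ++ t, (runB (enumN k l) u ps).2) := by
  induction l with
  | nil =>
    intro k d u t ps _ _
    simp [runB, enumN]
  | cons c rest ih =>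
    intro k d u t ps hlen hpos
    have hd0 : ¬ d = 0 := by
      intro h
      subst h
      rw [scanL_zero] at hpos
      simp at hpos
    rw [scanL, if_neg hd0] at hpos
    simp only at hpos
    rw [enumN, runB_cons, runB_cons]
    by_cases h1 : c = '['
    · rw [if_pos h1] at hpos
      have hs : stepB (u ++ t, ps) (k, c) = ((k :: u) ++ t, ps) := by simp [stepB, h1]
      have hs2 : stepB (u, ps) (k, c) = (k :: u, ps) := by simp [stepB, h1]
      rw [hs, hs2]
      exact ih (k + 1) (d + 1) (k :: u) t ps (by simp; omega) hpos
    · by_cases h2 : c = ']'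
      · rw [if_neg h1, if_pos h2] at hpos
        have hd1 : ¬ d = 1 := by
          intro h
          subst h
          simp only [Nat.sub_self] at hpos
          rw [scanL_zero] at hpos
          simp at hpos
        cases u with
        | nil => simp at hlen; omega
        | cons p u₁ =>
          have hs : stepB ((p :: u₁) ++ t, ps) (k, c) = (u₁ ++ t, ps ++ [(p, k)]) := by
            simp [stepB, h2]
          have hs2 : stepB (p :: u₁, ps) (k, c) = (u₁, ps ++ [(p, k)]) := by
            simp [stepB, h2]
          rw [hs, hs2]
          exact ih (k + 1) (d - 1) u₁ t (ps ++ [(p, k)]) (by simp at hlen ⊢; omega) hpos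
      · rw [if_neg h1, if_neg h2] at hpos
        have hs : stepB (u ++ t, ps) (k, c) = (u ++ t, ps) := by simp [stepB, h1, h2]
        have hs2 : stepB (u, ps) (k, c) = (u, ps) := by simp [stepB, h1, h2]
        rw [hs, hs2]
        exact ih (k + 1) d u t ps hlen hpos

-- when the scan reaches depth 0 after m chars, the fold pops all of u, recording the bottom of u
-- as the last pair, every other new pair starting in u.dropLast or at index ≥ k
theorem runB_succ (l : List Char) :
    ∀ (k d : Nat) (u t : List Nat) (ps : List (Nat × Nat)) (hu : u ≠ []),
      u.length = d → (scanL l d).2 = 0 →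
      ∃ P, runB (enumN k l) (u ++ t) ps
            = runB (enumN (k + (scanL l d).1) (l.drop (scanL l d).1)) t
                (ps ++ P ++ [(u.getLast hu, k + (scanL l d).1 - 1)])
        ∧ (∀ pr ∈ P, pr.1 ∈ u.dropLast ∨ k ≤ pr.1) := by
  induction l with
  | nil =>
    intro k d u t ps hu hlen hz
    exfalso
    simp [scanL] at hz
    cases u with
    | nil => exact hu rfl
    | cons p u₁ => simp at hlen; omega
  | cons c rest ih =>
    intro k d u t ps hu hlen hz
    have hd0 : ¬ d = 0 := by
      intro h
      cases u with
      | nil => exact hu rfl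
      | cons p u₁ => subst h; simp at hlen
    rw [scanL, if_neg hd0] at hz ⊢
    simp only at hz ⊢
    rw [enumN, runB_cons]
    by_cases h1 : c = '['
    · rw [if_pos h1] at hz ⊢
      have hs : stepB (u ++ t, ps) (k, c) = ((k :: u) ++ t, ps) := by simp [stepB, h1]
      rw [hs]
      obtain ⟨P, hP, hm⟩ := ih (k + 1) (d + 1) (k :: u) t ps (by simp) (by simp [hlen]) hz
      have harith : k + ((scanL rest (d + 1)).1 + 1) = k + 1 + (scanL rest (d + 1)).1 := by
        omega
      refine ⟨P, ?_, ?_⟩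
      · rw [hP, List.drop_succ_cons, harith, List.getLast_cons hu]
      · intro pr hpr
        rcases hm pr hpr with h | h
        · have hdl : (k :: u).dropLast = k :: u.dropLast := by
            cases u with
            | nil => exact absurd rfl hu
            | cons p u₁ => rfl
          rw [hdl] at h
          rcases List.mem_cons.mp h with h' | h'
          · right; omega
          · exact Or.inl h'
        · right; omega
    · by_cases h2 : c = ']'
      · rw [if_neg h1, if_pos h2] at hz ⊢
        cases u with
        | nil => exact absurd rfl hu
        | cons p u₁ =>
          have hs : stepB ((p :: u₁) ++ t, ps) (k, c) = (u₁ ++ t, ps ++ [(p, k)]) := by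
            simp [stepB, h2]
          rw [hs]
          by_cases hone : u₁ = []
          · subst hone
            have hd1 : d = 1 := by simp at hlen; omega
            subst hd1
            simp only [Nat.sub_self] at hz ⊢
            rw [scanL_zero]
            refine ⟨[], ?_, by simp⟩
            simp
          · have hlen' : u₁.length = d - 1 := by simp at hlen; omega
            obtain ⟨P', hP, hm⟩ := ih (k + 1) (d - 1) u₁ t (ps ++ [(p, k)]) hone hlen' hz
            have harith : k + ((scanL rest (d - 1)).1 + 1) = k + 1 + (scanL rest (d - 1)).1 := by
              omega
            refine ⟨(p, k) :: P', ?_, ?_⟩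
            · rw [hP, List.drop_succ_cons, harith, List.getLast_cons hone]
              simp
            · intro pr hpr
              have hdl : (p :: u₁).dropLast = p :: u₁.dropLast := by
                cases u₁ with
                | nil => exact absurd rfl hone
                | cons a b => rfl
              rcases List.mem_cons.mp hpr with h | h
              · subst h
                exact Or.inl (by rw [hdl]; exact List.mem_cons_self ..)
              · rcases hm pr h with h' | h'
                · exact Or.inl (by rw [hdl]; exact List.mem_cons_of_mem _ h')
                · right; omega
      · rw [if_neg h1, if_neg h2] at hz ⊢
        have hs : stepB (u ++ t, ps) (k, c) = (u ++ t, ps) := by simp [stepB, h1, h2]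
        rw [hs]
        obtain ⟨P, hP, hm⟩ := ih (k + 1) d u t ps hu hlen hz
        have harith : k + ((scanL rest d).1 + 1) = k + 1 + (scanL rest d).1 := by omega
        refine ⟨P, ?_, ?_⟩
        · rw [hP, List.drop_succ_cons, harith]
        · intro pr hpr
          rcases hm pr hpr with h | h
          · exact Or.inl h
          · right; omega

theorem runB_lb (l : List Char) :
    ∀ (c k : Nat) (t : List Nat) (ps : List (Nat × Nat)),
      (∀ x ∈ t, c ≤ x) → c ≤ k → (∀ pr ∈ ps, c ≤ pr.1) →
      ∀ pr ∈ (runB (enumN k l) t ps).2, c ≤ pr.1 := by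
  induction l with
  | nil =>
    intro c k t ps h1 h2 h3
    simpa [runB, enumN] using h3
  | cons ch rest ih =>
    intro c k t ps h1 h2 h3
    rw [enumN, runB_cons]
    by_cases e1 : ch = '['
    · have hs : stepB (t, ps) (k, ch) = (k :: t, ps) := by simp [stepB, e1]
      rw [hs]
      refine ih c (k + 1) (k :: t) ps ?_ (by omega) h3
      intro x hx
      rcases List.mem_cons.mp hx with h | h
      · omega
      · exact h1 x h
    · by_cases e2 : ch = ']'
      · cases t with
        | nil =>
          have hs : stepB (([] : List Nat), ps) (k, ch) = ([], ps) := by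
            simp [stepB, e2]
          rw [hs]
          exact ih c (k + 1) [] ps (by simp) (by omega) h3
        | cons p t' =>
          have hs : stepB (p :: t', ps) (k, ch) = (t', ps ++ [(p, k)]) := by
            simp [stepB, e2]
          rw [hs]
          refine ih c (k + 1) t' (ps ++ [(p, k)]) (fun x hx => h1 x (by simp [hx])) (by omega) ?_
          intro pr hpr
          rcases List.mem_append.mp hpr with h | h
          · exact h3 pr h
          · simp at h
            subst h
            exact h1 p (by simp)
      · have hs : stepB (t, ps) (k, ch) = (t, ps) := by simp [stepB, e1, e2]
        rw [hs]
        exact ih c (k + 1) t ps h1 (by omega) h3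

theorem filtR_append (cs : List Char) (l₁ l₂ : List (Nat × Nat)) (m : Nat) :
    filtR cs (l₁ ++ l₂) m = filtR cs l₂ (minpA l₁ m) ++ filtR cs l₁ m := by
  induction l₁ generalizing m with
  | nil => simp [filtR, minpA]
  | cons pr rest ih =>
    rw [List.cons_append, filtR, filtR, minpA]
    split
    · rw [ih]
      simp
    · rw [ih]

theorem minpA_lb (l : List (Nat × Nat)) (c m : Nat) (hm : c ≤ m)
    (h : ∀ pr ∈ l, c ≤ pr.1) : c ≤ minpA l m := by
  induction l generalizing m with
  | nil => simpa using hm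
  | cons pr rest ih =>
    rw [minpA]
    apply ih
    · have := h pr (by simp)
      split <;> omega
    · exact fun q hq => h q (by simp [hq])

theorem filtR_nil (cs : List Char) (l : List (Nat × Nat)) (m : Nat)
    (h : ∀ pr ∈ l, ¬ pr.1 < m) : filtR cs l m = [] := by
  induction l generalizing m with
  | nil => rfl
  | cons pr rest ih =>
    rw [filtR, if_neg (h pr (by simp))]
    exact ih _ (fun q hq => h q (by simp [hq]))

theorem foldl_filtStep (cs : List Char) (l : List (Nat × Nat)) :
    ∀ (m : Nat) (acc : List (Int × Int × String × String)),
      (List.foldl (filtStep cs) (m, acc) l).2.reverse = filtR cs l m ++ acc.reverse := by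
  induction l with
  | nil => simp [filtR]
  | cons pr rest ih =>
    intro m acc
    rw [List.foldl_cons, filtR]
    by_cases hc : pr.1 < m
    · have hstep : filtStep cs (m, acc) pr = (pr.1, acc ++ [mkOut cs pr.1 pr.2]) := by
        simp [filtStep, hc]
      rw [hstep, ih, if_pos hc]
      simp
    · have hstep : filtStep cs (m, acc) pr = (m, acc) := by
        simp [filtStep, hc]
      rw [hstep, ih, if_neg hc]

theorem sl_empty (cs : List Char) (a b : Nat) (h : cs.length ≤ a) : sl cs a b = "" := by
  unfold sl
  rw [PySem.List.slice_natCast]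
  rw [List.drop_eq_nil_of_le h]
  simp
  rfl

theorem main_eq (cs : List Char) (i : Nat) :
    goA cs i = filtR cs ((runB (enumN i (cs.drop i)) [] []).2).reverse cs.length := by
  fun_induction goA cs i with
  | case1 i h hbr r hz ih =>
    have hbridge := scanA_eq_scanL cs (i + 1) 1
    have hrdef : r = scanA cs (i + 1) 1 := rfl
    set l := cs.drop (i + 1) with hl
    set m := (scanL l 1).1 with hm
    have hr1 : r.1 = i + 1 + m := by rw [hrdef, hbridge]
    have hsz : (scanL l 1).2 = 0 := by rw [hrdef, hbridge] at hz; exact hz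
    have hgi : cs[i] = '[' := by
      rw [← hbr]
      simp [List.getD_eq_getElem?_getD, List.getElem?_eq_getElem h]
    rw [List.drop_eq_getElem_cons h, enumN, runB_cons]
    have hpush : stepB (([] : List Nat), ([] : List (Nat × Nat))) (i, cs[i]) = ([i], []) := by
      simp [stepB, hgi]
    rw [hpush]
    obtain ⟨P, hP, hmem⟩ := runB_succ l (i + 1) 1 [i] [] [] (by simp) (by simp) hsz
    simp only [List.append_nil, List.nil_append] at hP
    rw [hP]
    have hgl : ([i] : List ℕ).getLast (by simp) = i := rfl
    have harr : i + 1 + m - 1 = i + m := by omega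
    rw [hgl, harr]
    have hdd : List.drop m l = List.drop (i + 1 + m) cs := by
      rw [hl, List.drop_drop]
    rw [hdd, runB_acc]
    simp only
    set Q := (runB (enumN (i + 1 + m) (List.drop (i + 1 + m) cs)) [] []).2 with hQ
    rw [List.reverse_append, List.reverse_append, List.reverse_singleton,
      List.singleton_append, filtR_append, filtR]
    have hQlb : ∀ pr ∈ Q.reverse, i + 1 ≤ pr.1 := by
      intro pr hpr
      exact runB_lb _ (i + 1) (i + 1 + m) [] [] (by simp) (by omega) (by simp) pr
        (List.mem_reverse.mp hpr)
    have hmin : i < minpA Q.reverse cs.length := by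
      have := minpA_lb Q.reverse (i + 1) cs.length (by omega) hQlb
      omega
    rw [if_pos hmin]
    rw [filtR_nil cs P.reverse i
      (by
        intro pr hpr
        have := hmem pr (List.mem_reverse.mp hpr)
        simp at this
        omega)]
    simp only [List.nil_append]
    rw [hr1] at ih
    rw [hr1, ih]
    congr 1
    unfold mkOut
    have h1' : i + 1 + m - 1 = i + m := by omega
    have h2' : i + m + 1 = i + 1 + m := by omega
    have h3' : i + m + 2 = i + 1 + m + 1 := by omega
    rw [h1', h2', h3']
    by_cases hlt : i + 1 + m < cs.length
    · rw [if_pos hlt]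
    · rw [if_neg hlt]
      rw [sl_empty cs (i + 1 + m) (i + 1 + m + 1) (by omega)]
  | case2 i h hbr r hz ih =>
    have hbridge := scanA_eq_scanL cs (i + 1) 1
    have hrdef : r = scanA cs (i + 1) 1 := rfl
    have hsz : 0 < (scanL (cs.drop (i + 1)) 1).2 := by
      rw [hrdef, hbridge] at hz
      omega
    have hgi : cs[i] = '[' := by
      rw [← hbr]
      simp [List.getD_eq_getElem?_getD, List.getElem?_eq_getElem h]
    rw [List.drop_eq_getElem_cons h, enumN, runB_cons]
    have hpush : stepB (([] : List Nat), ([] : List (Nat × Nat))) (i, cs[i]) = ([i], []) := by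
      simp [stepB, hgi]
    rw [hpush]
    have hnp := runB_nopop (cs.drop (i + 1)) (i + 1) 1 [] [i] [] (by simp) hsz
    simp only [List.nil_append] at hnp
    rw [hnp]
    exact ih
  | case3 i h hbr ih =>
    have hgne : ¬ cs[i] = '[' := by
      intro hc
      apply hbr
      simp [List.getD_eq_getElem?_getD, List.getElem?_eq_getElem h, hc]
    rw [List.drop_eq_getElem_cons h, enumN, runB_cons]
    have hs : stepB (([] : List Nat), ([] : List (Nat × Nat))) (i, cs[i]) = ([], []) := by
      by_cases hrb : cs[i] = ']' <;> simp [stepB, hgne, hrb]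
    rw [hs]
    exact ih
  | case4 i h =>
    rw [List.drop_eq_nil_of_le (by omega)]
    simp [enumN, runB, filtR]

-- ===== VERDICT (by name: the statement is the Claim_ definition above) =====
theorem find_brackets_spec : Claim_equal_find_brackets := by
  intro line _
  unfold Spec_find_brackets find_brackets find_brackets_alt
  rw [main_eq line.toList 0]
  rw [foldl_filtStep]
  simp [runB]
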